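-- pv_equiv track=rewrite | github.com/Netflix/repokid | repokid/utils/roledata.py | _convert_repoable_perms_to_perms_and_services
-- ===== SOURCE A (Python) =====
-- from collections import defaultdict
-- from typing import Set
-- from typing import Tuple
--
-- def _convert_repoable_perms_to_perms_and_services(
--     total_permissions: Set[str], repoable_permissions: Set[str]
-- ) -> Tuple[Set[str], Set[str]]:
--     """
--     Take a list of total permissions and repoable permissions and determine whether only a few permissions are being
--     repoed or if the entire service (all permissions from that service) are being removed.
--
--     Args:
--         total_permissions (set): A list of the total permissions a role has
--         repoable_permissions (set): A list of repoable permissions suggested to be removed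
--
--     Returns:
--         set: Set of permissions that will be individually removed but other permissions from the service will
--               be kept
--         set: Set of services that will be completely removed
--     """
--     repoed_permissions: Set[str] = set()
--     repoed_services: Set[str] = set()
--
--     total_perms_by_service = defaultdict(list)
--     repoable_perms_by_service = defaultdict(list)
--
--     # group total permissions and repoable permissions by service
--     for perm in total_permissions:
--         total_perms_by_service[perm.split(":")[0]].append(perm)
--
--     for perm in repoable_permissions:
--         repoable_perms_by_service[perm.split(":")[0]].append(perm)
--
--     for service in repoable_perms_by_service:
--         if all(
--             perm in repoable_perms_by_service[service]
--             for perm in total_perms_by_service[service]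
--         ):
--             repoed_services.add(service)
--         else:
--             repoed_permissions.update(
--                 perm for perm in repoable_perms_by_service[service]
--             )
--
--     return repoed_permissions, repoed_services
-- ===== SOURCE B (Python) =====
-- from collections import defaultdict
-- from typing import Set
-- from typing import Tuple
--
--
-- def _convert_repoable_perms_to_perms_and_services(
--     total_permissions: Set[str], repoable_permissions: Set[str]
-- ) -> Tuple[Set[str], Set[str]]:
--     # Services that keep at least one permission: computed in one complement pass,
--     # instead of grouping total permissions and running a per-service all() subset check.
--     kept_services = {
--         p.split(":")[0] for p in total_permissions if p not in repoable_permissions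
--     }
--
--     repoable_by_service = defaultdict(list)
--     for perm in repoable_permissions:
--         repoable_by_service[perm.split(":")[0]].append(perm)
--
--     repoed_permissions: Set[str] = set()
--     repoed_services: Set[str] = set()
--     for service, perms in repoable_by_service.items():
--         if service in kept_services:
--             repoed_permissions.update(perms)
--         else:
--             repoed_services.add(service)
--     return repoed_permissions, repoed_services
-- ===== Notes on version B (the rewrite author's own statement) =====
-- stated objective: simpler
-- what changed: B replaces A's grouping of total permissions plus a per-service all()-subset check over lists with a single complement pass that computes the set of services still keeping a permission, then classifies each repoable service by one set-membership test.
import Mathlib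
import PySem

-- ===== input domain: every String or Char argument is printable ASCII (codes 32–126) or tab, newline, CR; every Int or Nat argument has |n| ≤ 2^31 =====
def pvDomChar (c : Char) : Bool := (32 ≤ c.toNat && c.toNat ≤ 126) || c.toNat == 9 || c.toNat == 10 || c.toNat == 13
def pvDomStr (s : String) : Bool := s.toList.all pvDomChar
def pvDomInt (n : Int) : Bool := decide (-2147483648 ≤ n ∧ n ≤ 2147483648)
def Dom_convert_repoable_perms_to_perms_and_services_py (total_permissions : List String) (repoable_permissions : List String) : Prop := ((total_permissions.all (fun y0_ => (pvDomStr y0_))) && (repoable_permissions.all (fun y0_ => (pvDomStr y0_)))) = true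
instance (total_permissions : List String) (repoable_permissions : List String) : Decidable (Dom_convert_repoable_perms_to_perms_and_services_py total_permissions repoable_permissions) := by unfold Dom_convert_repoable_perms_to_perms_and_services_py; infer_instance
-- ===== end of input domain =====

-- B replaces A's grouping of total permissions plus per-service all()-subset checks by one
-- complement pass computing the services that keep a permission (objective: simpler).

-- ===== PORT A =====
-- perm.split(":")[0] (split on a nonempty separator is never empty, so index 0 is in range)
def pvService (p : String) : String := PySem.List.pyGetD ((PySem.Str.split? p ":").getD []) 0 ""

def convert_repoable_perms_to_perms_and_services_py (total_permissions : List String) (repoable_permissions : List String) : List String × List String :=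
  -- total_perms_by_service / repoable_perms_by_service: defaultdict(list) grouping loops
  let total_by : PySem.Dict String (List String) :=
    total_permissions.foldl (fun d p => d.modify (pvService p) [] (fun l => l ++ [p])) PySem.Dict.empty
  let repo_by : PySem.Dict String (List String) :=
    repoable_permissions.foldl (fun d p => d.modify (pvService p) [] (fun l => l ++ [p])) PySem.Dict.empty
  -- for service in repoable_perms_by_service: … (defaultdict __getitem__ read as getD [];
  -- the missing-key insertion it performs never changes a later read here)
  repo_by.keys.foldl
    (fun (st : PySem.Set String × PySem.Set String) s =>
      if (total_by.getD s []).all (fun perm => (repo_by.getD s []).contains perm) then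
        (st.1, PySem.Set.add st.2 s)
      else
        (PySem.Set.update st.1 (repo_by.getD s []), st.2))
    (PySem.Set.empty, PySem.Set.empty)

-- ===== PORT B =====
def convert_repoable_perms_to_perms_and_services_py_alt (total_permissions : List String) (repoable_permissions : List String) : List String × List String :=
  let kept_services : PySem.Set String :=
    PySem.Set.ofList ((total_permissions.filter (fun p => !repoable_permissions.contains p)).map pvService)
  let repoable_by_service : PySem.Dict String (List String) :=
    repoable_permissions.foldl (fun d p => d.modify (pvService p) [] (fun l => l ++ [p])) PySem.Dict.empty
  repoable_by_service.items.foldl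
    (fun (st : PySem.Set String × PySem.Set String) sp =>
      if PySem.Set.contains kept_services sp.1 then
        (PySem.Set.update st.1 sp.2, st.2)
      else
        (st.1, PySem.Set.add st.2 sp.1))
    (PySem.Set.empty, PySem.Set.empty)

-- ===== PRECONDITION & SPEC =====
def Spec_convert_repoable_perms_to_perms_and_services_py (total_permissions : List String) (repoable_permissions : List String) (out : List String × List String) : Prop := out = convert_repoable_perms_to_perms_and_services_py_alt total_permissions repoable_permissions
instance (total_permissions : List String) (repoable_permissions : List String) (out : List String × List String) : Decidable (Spec_convert_repoable_perms_to_perms_and_services_py total_permissions repoable_permissions out) := by unfold Spec_convert_repoable_perms_to_perms_and_services_py; infer_instance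

-- ===== CLAIM (what is proved, stated in full; the proofs are below) =====
def Claim_equal_convert_repoable_perms_to_perms_and_services_py : Prop := ∀ (total_permissions : List String) (repoable_permissions : List String), Dom_convert_repoable_perms_to_perms_and_services_py total_permissions repoable_permissions → Spec_convert_repoable_perms_to_perms_and_services_py total_permissions repoable_permissions (convert_repoable_perms_to_perms_and_services_py total_permissions repoable_permissions)

-- ===== LEMMAS AND PROOFS =====

-- the grouping loop, read back: lookup
theorem pvGetD_group (l : List String) (s : String) :
    (l.foldl (fun d p => d.modify (pvService p) [] (fun l => l ++ [p])) PySem.Dict.empty).getD s []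
      = l.filter (fun p => pvService p == s) := by
  have h := PySem.Dict.getD_foldl_modify_append
      (l := l.map (fun p => (pvService p, p))) (d := (PySem.Dict.empty : PySem.Dict String (List String))) (c := s)
  rw [List.foldl_map] at h
  simpa [Function.comp_def, List.filter_map] using h

theorem pvNodup_group (l : List String) :
    (l.foldl (fun d p => d.modify (pvService p) [] (fun l => l ++ [p])) PySem.Dict.empty).keys.Nodup := by
  exact PySem.Dict.nodup_keys_foldl_modify_key l pvService [] _ _ PySem.Dict.nodup_keys_empty

-- A's per-service subset test equals "the service keeps no permission"
theorem pvCond_eq (total repoable : List String) (s : String) :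
    ((total.filter (fun p => pvService p == s)).all
        (fun perm => (repoable.filter (fun p => pvService p == s)).contains perm))
      = !PySem.Set.contains
          (PySem.Set.ofList ((total.filter (fun p => !repoable.contains p)).map pvService)) s := by
  have hmem : PySem.Set.contains
      (PySem.Set.ofList ((total.filter (fun p => !repoable.contains p)).map pvService)) s = true
      ↔ ∃ p, p ∈ total ∧ p ∉ repoable ∧ pvService p = s := by
    simp [PySem.Set.contains, PySem.Set.mem_ofList, List.mem_map, List.mem_filter]
    tauto
  cases hR : PySem.Set.contains
      (PySem.Set.ofList ((total.filter (fun p => !repoable.contains p)).map pvService)) s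
  · have h1 : ∀ p ∈ total, pvService p = s → p ∈ repoable := by
      intro p hp hs
      by_contra hnp
      have hc := hmem.mpr ⟨p, hp, hnp, hs⟩
      rw [hR] at hc
      exact absurd hc (by decide)
    simp only [Bool.not_false, List.all_eq_true]
    intro p hp
    simp only [List.mem_filter, beq_iff_eq] at hp
    simp only [List.contains_eq_mem, List.mem_filter, beq_iff_eq, decide_eq_true_eq]
    exact ⟨h1 p hp.1 hp.2, hp.2⟩
  · obtain ⟨p, hp, hnp, hs⟩ := hmem.mp hR
    simp only [Bool.not_true, List.all_eq_false]
    refine ⟨p, by simp [List.mem_filter, hp, hs], ?_⟩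
    simp [List.contains_eq_mem, List.mem_filter, hnp]

-- ===== VERDICT (by name: the statement is the Claim_ definition above) =====
theorem convert_repoable_perms_to_perms_and_services_py_spec : Claim_equal_convert_repoable_perms_to_perms_and_services_py := by
  intro total repoable _
  unfold Spec_convert_repoable_perms_to_perms_and_services_py
  unfold convert_repoable_perms_to_perms_and_services_py convert_repoable_perms_to_perms_and_services_py_alt
  dsimp only
  rw [PySem.Dict.items_eq_map_keys _ (pvNodup_group repoable) [], List.foldl_map]
  congr 1
  funext st s
  simp only [pvGetD_group]
  rw [pvCond_eq]
  cases h : PySem.Set.contains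
      (PySem.Set.ofList ((total.filter (fun p => !repoable.contains p)).map pvService)) s <;>
    simp
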